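-- pv_equiv track=rewrite | github.com/Grumbel/dirtool | dirtools/find/util.py | replace_item
-- ===== SOURCE A (Python) =====
-- from typing import List, Any
--
-- def replace_item(lst, needle, replacements):
--     result: List[Any] = []
--     for i in lst:
--         if i == needle:
--             result += replacements
--         else:
--             result.append(i)
--     return result
-- ===== SOURCE B (Python) =====
-- def replace_item(lst, needle, replacements):
--     result = []
--     prev = 0
--     for idx in range(len(lst)):
--         if lst[idx] == needle:
--             result.extend(lst[prev:idx])
--             result.extend(replacements)
--             prev = idx + 1
--     result.extend(lst[prev:])
--     return result
-- ===== Notes on version B (the rewrite author's own statement) =====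
-- stated objective: alternative
-- what changed: B carves the list into runs between needle positions (slice-and-join with a prev pointer) and splices the replacements between them, instead of dispatching each element one by one as A does.
import Mathlib
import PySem

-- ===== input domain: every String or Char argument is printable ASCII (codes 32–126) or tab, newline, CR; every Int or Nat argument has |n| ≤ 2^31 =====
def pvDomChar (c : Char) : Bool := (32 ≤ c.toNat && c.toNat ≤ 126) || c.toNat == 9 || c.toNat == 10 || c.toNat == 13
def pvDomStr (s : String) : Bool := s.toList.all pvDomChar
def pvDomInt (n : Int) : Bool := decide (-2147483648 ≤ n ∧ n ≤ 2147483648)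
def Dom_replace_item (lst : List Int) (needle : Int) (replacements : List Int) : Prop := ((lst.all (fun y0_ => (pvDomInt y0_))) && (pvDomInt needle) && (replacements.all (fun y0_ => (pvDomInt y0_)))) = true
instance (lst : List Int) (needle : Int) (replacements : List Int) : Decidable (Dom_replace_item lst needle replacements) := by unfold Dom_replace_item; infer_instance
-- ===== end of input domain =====

-- B reassembles the list from the runs between needle positions (slice-and-join with a prev
-- pointer, splicing the replacements between runs) instead of dispatching element by element.


-- ===== PORT A =====
def replace_item (lst : List Int) (needle : Int) (replacements : List Int) : List Int :=
  lst.foldl (fun result i => if i = needle then result ++ replacements else result ++ [i]) []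

-- ===== PORT B =====
-- loop `for idx in range(len(lst))`; the counter n = len(lst) - idx indices still to visit
def replace_item_altGo (lst : List Int) (needle : Int) (replacements : List Int) :
    Nat → Nat → Nat → List Int → List Int
  | 0, _, prev, result => result ++ PySem.List.slice lst (some (prev : Int)) none
  | n + 1, idx, prev, result =>
    if lst.getD idx 0 = needle then
      replace_item_altGo lst needle replacements n (idx + 1) (idx + 1)
        (result ++ PySem.List.slice lst (some (prev : Int)) (some (idx : Int)) ++ replacements)
    else
      replace_item_altGo lst needle replacements n (idx + 1) prev result

def replace_item_alt (lst : List Int) (needle : Int) (replacements : List Int) : List Int :=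
  replace_item_altGo lst needle replacements lst.length 0 0 []

-- ===== PRECONDITION & SPEC =====
def Spec_replace_item (lst : List Int) (needle : Int) (replacements : List Int) (out : List Int) : Prop := out = replace_item_alt lst needle replacements
instance (lst : List Int) (needle : Int) (replacements : List Int) (out : List Int) : Decidable (Spec_replace_item lst needle replacements out) := by unfold Spec_replace_item; infer_instance

-- ===== CLAIM (what is proved, stated in full; the proofs are below) =====
def Claim_equal_replace_item : Prop := ∀ (lst : List Int) (needle : Int) (replacements : List Int), Dom_replace_item lst needle replacements → Spec_replace_item lst needle replacements (replace_item lst needle replacements)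

-- ===== LEMMAS AND PROOFS =====

-- A is a flatMap of the per-element expansion
theorem replace_item_eq_flatMap (lst : List Int) (needle : Int) (replacements : List Int) :
    replace_item lst needle replacements
      = lst.flatMap (fun i => if i = needle then replacements else [i]) := by
  unfold replace_item
  have h : (fun (result : List Int) (i : Int) =>
      if i = needle then result ++ replacements else result ++ [i])
      = fun result i => result ++ (if i = needle then replacements else [i]) := by
    funext result i; split <;> rfl
  rw [h, PySem.List.foldl_append_eq_flatMap]
  simp

theorem flatMap_id_of_no_needle (needle : Int) (replacements : List Int) (l : List Int)
    (h : ∀ x ∈ l, x ≠ needle) :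
    l.flatMap (fun i => if i = needle then replacements else [i]) = l := by
  induction l with
  | nil => rfl
  | cons a t ih =>
    simp only [List.flatMap_cons]
    rw [if_neg (h a (by simp)), ih (fun x hx => h x (by simp [hx]))]
    rfl

theorem no_needle_of_seg (lst : List Int) (needle : Int) (prev k : Nat)
    (h : ∀ j : Nat, prev ≤ j → j < k → j < lst.length → lst.getD j 0 ≠ needle) :
    ∀ x ∈ (lst.drop prev).take (k - prev), x ≠ needle := by
  intro x hx
  obtain ⟨i, hi, hgx⟩ := List.mem_iff_getElem.mp hx
  have hm : i < k - prev ∧ i < lst.length - prev := by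
    have := hi; simp [List.length_take, List.length_drop] at this; omega
  have hdl : prev + i < lst.length := by omega
  have hlen2 : i < (lst.drop prev).length := by simp [List.length_drop]; omega
  have : lst[prev + i] = x := by
    rw [List.getElem_take] at hgx
    rw [← hgx, List.getElem_drop]
  have hne := h (prev + i) (by omega) (by omega) hdl
  rwa [List.getD_eq_getElem lst 0 hdl, this] at hne

theorem altGo_eq (lst : List Int) (needle : Int) (replacements : List Int) :
    ∀ (n idx prev : Nat) (result : List Int),
      idx + n = lst.length → prev ≤ idx →
      (∀ j : Nat, prev ≤ j → j < idx → lst.getD j 0 ≠ needle) →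
      result = (lst.take prev).flatMap (fun i => if i = needle then replacements else [i]) →
      replace_item_altGo lst needle replacements n idx prev result
        = lst.flatMap (fun i => if i = needle then replacements else [i]) := by
  intro n
  induction n with
  | zero =>
    intro idx prev result hlen hle hseg hres
    simp only [replace_item_altGo]
    rw [PySem.List.slice_from_natCast, hres]
    have hdrop : (lst.drop prev).take (lst.length - prev) = lst.drop prev := by
      apply List.take_of_length_le; simp
    have hnon : ∀ x ∈ lst.drop prev, x ≠ needle := by
      intro x hx
      refine no_needle_of_seg lst needle prev lst.length (fun j h1 h2 h3 => ?_) x ?_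
      · exact hseg j h1 (by omega)
      · rw [hdrop]; exact hx
    rw [← flatMap_id_of_no_needle needle replacements (lst.drop prev) hnon,
        ← List.flatMap_append, List.take_append_drop]
  | succ n ih =>
    intro idx prev result hlen hle hseg hres
    have hidx : idx < lst.length := by omega
    simp only [replace_item_altGo]
    by_cases hca : lst.getD idx 0 = needle
    · rw [if_pos hca]
      apply ih (idx + 1) (idx + 1) _ (by omega) (le_refl _) (by intro j h1 h2; omega)
      rw [PySem.List.slice_natCast, hres]
      have hseg' : (lst.drop prev).take (idx - prev) = (lst.take idx).drop prev := by
        rw [List.drop_take]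
      have hnon := no_needle_of_seg lst needle prev idx (fun j h1 h2 _ => hseg j h1 h2)
      have htake : lst.take (idx + 1) = lst.take idx ++ [lst[idx]] := by
        rw [List.take_add_one, List.getElem?_eq_getElem hidx]; rfl
      have this1 : lst[idx] = needle := by rwa [List.getD_eq_getElem lst 0 hidx] at hca
      have hsplit : lst.take idx = lst.take prev ++ (lst.drop prev).take (idx - prev) := by
        rw [hseg']
        conv_lhs => rw [← List.take_append_drop prev (lst.take idx)]
        rw [List.take_take, min_eq_left hle]
      rw [htake, List.flatMap_append, hsplit, List.flatMap_append,
          flatMap_id_of_no_needle needle replacements ((lst.drop prev).take (idx - prev)) hnon]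
      simp [this1]
    · rw [if_neg hca]
      apply ih (idx + 1) prev _ (by omega) (by omega) _ hres
      intro j h1 h2
      by_cases hj : j < idx
      · exact hseg j h1 hj
      · have : j = idx := by omega
        rwa [this]

-- ===== VERDICT (by name: the statement is the Claim_ definition above) =====
theorem replace_item_spec : Claim_equal_replace_item := by
  intro lst needle replacements _
  unfold Spec_replace_item replace_item_alt
  rw [replace_item_eq_flatMap,
      altGo_eq lst needle replacements lst.length 0 0 [] (by omega) (le_refl 0)
        (by intro j h1 h2; omega) (by simp)]
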